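-- pv_equiv track=rewrite | github.com/carlosacg/NoSqlProject | ENTREGA2/reader.py | separate_semicolon
-- ===== SOURCE A (Python) =====
-- def separate_semicolon(cadena): #SEPARA UNA CADENA POR PUNTO Y COMAS
--     x = 0
--     separador = 0
--     lista=[]
--     while x<len(cadena):
--         cadena = cadena.replace(".","_")
--         cadena = cadena.replace(" ","_")
--         if cadena[x]==';':
--             if cadena[separador:separador+1] != " ":
--                 lista.append(cadena[separador:x])
--                 separador=x+1
--             else:
--                 lista.append(cadena[separador+1:x])
--                 separador=x+1
--         if x == int(len(cadena))-1:
--             if(cadena[separador:x+1]!=""):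
--                 lista.append(cadena[separador:x+1])
--         x+=1
--     return lista
-- ===== SOURCE B (Python) =====
-- def separate_semicolon(cadena):
--     s = cadena.replace(".", "_").replace(" ", "_")
--     parts = s.split(";")
--     if parts and parts[-1] == "":
--         parts.pop()
--     return parts
-- ===== Notes on version B (the rewrite author's own statement) =====
-- stated objective: faster
-- what changed: A's manual while-loop with index/separador bookkeeping, which re-runs both character replacements on the whole string at every iteration, is replaced by one replace pass, a single library split on the semicolon separator, and dropping one trailing empty segment.
import Mathlib
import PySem

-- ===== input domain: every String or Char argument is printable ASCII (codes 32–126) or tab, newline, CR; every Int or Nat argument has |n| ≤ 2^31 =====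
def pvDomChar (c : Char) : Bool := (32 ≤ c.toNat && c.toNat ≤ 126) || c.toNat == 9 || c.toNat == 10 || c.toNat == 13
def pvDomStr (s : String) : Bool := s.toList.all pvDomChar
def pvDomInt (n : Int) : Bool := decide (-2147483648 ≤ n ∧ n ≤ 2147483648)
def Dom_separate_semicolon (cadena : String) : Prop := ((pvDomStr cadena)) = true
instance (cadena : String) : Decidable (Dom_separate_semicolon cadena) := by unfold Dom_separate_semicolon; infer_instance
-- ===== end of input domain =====

-- B replaces A's manual index/separador while-loop by one library split plus dropping a single trailing empty piece (objective: simpler).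

-- ===== PORT A =====
-- A's while-loop, transliterated: state (cadena, x, separador, lista); the fuel only
-- bounds the iteration count (one unit per loop pass; length+1 always suffices).
def sepGo : Nat → String → Int → Int → List String → List String
  | 0, _, _, _, lista => lista
  | fuel+1, cadena, x, separador, lista =>
    if x < PySem.Str.len cadena then
      let cadena := PySem.Str.replace cadena "." "_"
      let cadena := PySem.Str.replace cadena " " "_"
      let p : List String × Int :=
        if PySem.Str.pyGet? cadena x = some ';' then
          if PySem.Str.slice cadena (some separador) (some (separador+1)) ≠ " " then
            (lista ++ [PySem.Str.slice cadena (some separador) (some x)], x+1)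
          else
            (lista ++ [PySem.Str.slice cadena (some (separador+1)) (some x)], x+1)
        else (lista, separador)
      let lista2 :=
        if x = PySem.Str.len cadena - 1 then
          if PySem.Str.slice cadena (some p.2) (some (x+1)) ≠ "" then
            p.1 ++ [PySem.Str.slice cadena (some p.2) (some (x+1))]
          else p.1
        else p.1
      sepGo fuel cadena (x+1) p.2 lista2
    else lista

def separate_semicolon (cadena : String) : List String :=
  sepGo (cadena.toList.length + 1) cadena 0 0 []

-- ===== PORT B =====
def separate_semicolon_alt (cadena : String) : List String :=
  let s := PySem.Str.replace (PySem.Str.replace cadena "." "_") " " "_"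
  let parts := (PySem.Str.split? s ";").getD []
  if parts ≠ [] ∧ PySem.List.pyGet? parts (-1) = some "" then parts.dropLast else parts

-- ===== PRECONDITION & SPEC =====
def Spec_separate_semicolon (cadena : String) (out : List String) : Prop := out = separate_semicolon_alt cadena
instance (cadena : String) (out : List String) : Decidable (Spec_separate_semicolon cadena out) := by unfold Spec_separate_semicolon; infer_instance

-- ===== CLAIM (what is proved, stated in full; the proofs are below) =====
def Claim_equal_separate_semicolon : Prop := ∀ (cadena : String), Dom_separate_semicolon cadena → Spec_separate_semicolon cadena (separate_semicolon cadena)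

-- ===== LEMMAS AND PROOFS =====

-- '.'→'_' and ' '→'_' as character maps, and the double replace as N
def pvF1 (a : Char) : Char := if a = '.' then '_' else a
def pvF2 (a : Char) : Char := if a = ' ' then '_' else a
def pvN (l : List Char) : List Char := (l.map pvF1).map pvF2

-- manual split on ';' (cons form of str.split(';'))
def splitSemi : List Char → List (List Char)
  | [] => [[]]
  | c :: t => if c = ';' then [] :: splitSemi t else (splitSemi t).modifyHead (c :: ·)

-- drop one trailing empty segment
def dte (l : List (List Char)) : List (List Char) :=
  if l.getLast? = some [] then l.dropLast else l

lemma repl_go (c d : Char) : ∀ (s : List Char) (fuel : Nat) (acc : List Char), s.length ≤ fuel →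
    PySem.Chars.replace.go [c] [d] fuel s acc = acc.reverse ++ s.map (fun a => if a = c then d else a) := by
  intro s
  induction s with
  | nil => intro fuel acc _; cases fuel <;> simp [PySem.Chars.replace.go]
  | cons a t ih =>
    intro fuel acc hf
    cases fuel with
    | zero => simp at hf
    | succ n =>
      by_cases hac : a = c
      · subst hac
        rw [show PySem.Chars.replace.go [a] [d] (n+1) (a :: t) acc =
            PySem.Chars.replace.go [a] [d] n t ([d].reverse ++ acc) by
          simp [PySem.Chars.replace.go, List.isPrefixOf]]
        rw [ih n _ (by simpa using hf)]
        simp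
      · rw [show PySem.Chars.replace.go [c] [d] (n+1) (a :: t) acc =
            PySem.Chars.replace.go [c] [d] n t (a :: acc) by
          simp [PySem.Chars.replace.go, List.isPrefixOf, show ¬ c = a from fun h => hac h.symm]]
        rw [ih n _ (by simpa using hf)]
        simp [hac]

lemma repl_single (c d : Char) (s : List Char) :
    PySem.Chars.replace s [c] [d] = s.map (fun a => if a = c then d else a) := by
  simp [PySem.Chars.replace, repl_go c d s s.length [] le_rfl]

lemma splitSemi_ne_nil (l : List Char) : splitSemi l ≠ [] := by
  induction l with
  | nil => simp [splitSemi]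
  | cons c t ih =>
    simp only [splitSemi]
    split_ifs
    · simp
    · cases h : splitSemi t
      · exact absurd h ih
      · simp [List.modifyHead]

lemma splitOn_go_semi : ∀ (l : List Char) (fuel : Nat) (cur : List Char) (acc : List (List Char)),
    l.length ≤ fuel →
    PySem.Chars.splitOn.go [';'] fuel l cur acc =
      acc.reverse ++ (splitSemi l).modifyHead (cur.reverse ++ ·) := by
  intro l
  induction l with
  | nil => intro fuel cur acc _; cases fuel <;> simp [PySem.Chars.splitOn.go, splitSemi]
  | cons c t ih =>
    intro fuel cur acc hf
    cases fuel with
    | zero => simp at hf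
    | succ n =>
      by_cases hc : c = ';'
      · subst hc
        rw [show PySem.Chars.splitOn.go [';'] (n+1) (';' :: t) cur acc =
            PySem.Chars.splitOn.go [';'] n t [] (cur.reverse :: acc) by
          simp [PySem.Chars.splitOn.go, List.isPrefixOf]]
        rw [ih n _ _ (by simpa using hf)]
        rcases h : splitSemi t with _ | ⟨hd, tl⟩
        · exact absurd h (splitSemi_ne_nil t)
        · simp [splitSemi, h, List.modifyHead]
      · rw [show PySem.Chars.splitOn.go [';'] (n+1) (c :: t) cur acc =
            PySem.Chars.splitOn.go [';'] n t (c :: cur) acc by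
          simp [PySem.Chars.splitOn.go, List.isPrefixOf, show ¬ (';' : Char) = c from fun h => hc h.symm]]
        rw [ih n _ _ (by simpa using hf)]
        rcases h : splitSemi t with _ | ⟨hd, tl⟩
        · exact absurd h (splitSemi_ne_nil t)
        · simp [splitSemi, hc, h, List.modifyHead]

lemma splitOn_semi (l : List Char) : PySem.Chars.splitOn l [';'] = splitSemi l := by
  rw [PySem.Chars.splitOn, splitOn_go_semi l (l.length + 1) [] [] (by omega)]
  rcases h : splitSemi l with _ | ⟨hd, tl⟩
  · exact absurd h (splitSemi_ne_nil l)
  · simp [List.modifyHead]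

lemma pvN_idem (l : List Char) : pvN (pvN l) = pvN l := by
  simp only [pvN, List.map_map]
  apply List.map_congr_left
  intro a _
  simp only [Function.comp, pvF1, pvF2]
  split_ifs <;> simp_all

lemma pvN_length (l : List Char) : (pvN l).length = l.length := by simp [pvN]

lemma no_space_mem (l : List Char) (c : Char) (h : c ∈ pvN l) : c ≠ ' ' := by
  simp only [pvN, List.map_map, List.mem_map] at h
  obtain ⟨a, _, ha⟩ := h
  subst ha
  simp only [Function.comp, pvF1, pvF2]
  split_ifs <;> simp_all

lemma splitSemi_no (l : List Char) (h : (';' : Char) ∉ l) : splitSemi l = [l] := by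
  induction l with
  | nil => simp [splitSemi]
  | cons c t ih =>
    have hc : c ≠ ';' := by intro hc; exact h (hc ▸ List.mem_cons_self)
    have ht : (';' : Char) ∉ t := fun hm => h (List.mem_cons_of_mem _ hm)
    simp [splitSemi, hc, ih ht, List.modifyHead]

lemma splitSemi_append (a b : List Char) (h : (';' : Char) ∉ a) :
    splitSemi (a ++ ';' :: b) = a :: splitSemi b := by
  induction a with
  | nil => simp [splitSemi]
  | cons c t ih =>
    have hc : c ≠ ';' := by intro hc; exact h (hc ▸ List.mem_cons_self)
    have ht : (';' : Char) ∉ t := fun hm => h (List.mem_cons_of_mem _ hm)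
    simp only [List.cons_append, splitSemi, if_neg hc, ih ht, List.modifyHead]

lemma dte_cons (a : List Char) (r : List (List Char)) (h : r ≠ []) :
    dte (a :: r) = a :: dte r := by
  rcases r with _ | ⟨hd, tl⟩
  · exact absurd rfl h
  · simp only [dte, List.getLast?_cons_cons, List.dropLast_cons₂]
    split_ifs <;> rfl

lemma take_no_semi (g : List Char) (x sep : Nat) (hx : x < g.length)
    (hinv : ∀ i : Nat, sep ≤ i → i < x → g[i]? ≠ some ';') :
    (';' : Char) ∉ (g.drop sep).take (x - sep) := by
  intro hmem
  obtain ⟨j, hj, hget⟩ := List.mem_iff_getElem.mp hmem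
  have hjx : j < x - sep := lt_of_lt_of_le hj (by simp [List.length_take])
  have h1 : sep + j < g.length := by omega
  rw [List.getElem_take, List.getElem_drop] at hget
  exact hinv (sep + j) (by omega) (by omega)
    (by rw [List.getElem?_eq_getElem h1]; exact congrArg some hget)

lemma splitSemi_at (g : List Char) (x sep : Nat) (hsx : sep ≤ x) (hx : x < g.length)
    (hsem : g[x]? = some ';')
    (hinv : ∀ i : Nat, sep ≤ i → i < x → g[i]? ≠ some ';') :
    splitSemi (g.drop sep) = ((g.drop sep).take (x - sep)) :: splitSemi (g.drop (x+1)) := by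
  have hdec : g.drop sep = (g.drop sep).take (x - sep) ++ ';' :: g.drop (x+1) := by
    conv_lhs => rw [← List.take_append_drop (x - sep) (g.drop sep)]
    congr 1
    rw [List.drop_drop, show sep + (x - sep) = x by omega]
    rw [List.drop_eq_getElem_cons hx]
    congr 1
    have := List.getElem?_eq_getElem hx
    rw [this] at hsem
    exact Option.some_inj.mp hsem
  conv_lhs => rw [hdec]
  exact splitSemi_append _ _ (take_no_semi g x sep hx hinv)

lemma sepGo_exit (m : Nat) (s : String) (x sep : Int) (lista : List String)
    (h : PySem.Str.len s ≤ x) : sepGo m s x sep lista = lista := by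
  cases m with
  | zero => rfl
  | succ n => simp only [sepGo]; rw [if_neg (by omega)]

lemma sepGo_spec (g : List Char) (hg : pvN g = g) :
    ∀ (fuel : Nat) (s : String) (x sep : Nat) (lista : List String),
    pvN s.toList = g →
    x < g.length → g.length ≤ x + fuel →
    sep ≤ x →
    (∀ i : Nat, sep ≤ i → i < x → g[i]? ≠ some ';') →
    sepGo fuel s (x : Int) (sep : Int) lista
      = lista ++ (dte (splitSemi (g.drop sep))).map String.ofList := by
  intro fuel
  induction fuel with
  | zero => intro s x sep lista hs hx hf hsx hinv; omega
  | succ m ih =>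
    intro s x sep lista hs hx hf hsx hinv
    have hlen : s.toList.length = g.length := by rw [← hs, pvN_length]
    have hkey : PySem.Str.replace (PySem.Str.replace s "." "_") " " "_" = String.ofList g := by
      apply String.toList_inj.mp
      rw [PySem.Str.toList_replace, PySem.Str.toList_replace, String.toList_ofList,
        show (" ".toList) = [' '] from rfl, show ("_".toList) = ['_'] from rfl,
        repl_single, repl_single, String.toList_ofList]
      simpa [pvN, pvF1, pvF2] using hs
    have hguard : (x : Int) < PySem.Str.len s := by
      rw [PySem.Str.len_eq, hlen]; exact_mod_cast hx
    simp only [sepGo]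
    rw [if_pos hguard, hkey]
    have hpg : PySem.Str.pyGet? (String.ofList g) (x : Int) = g[x]? := by
      rw [PySem.Str.pyGet?_natCast, String.toList_ofList]
    have hlof : PySem.Str.len (String.ofList g) = (g.length : Int) := by
      rw [PySem.Str.len_eq, String.toList_ofList]
    have hsl : ∀ (a b : Nat), PySem.Str.slice (String.ofList g) (some (a : Int)) (some (b : Int))
        = String.ofList ((g.drop a).take (b - a)) := by
      intro a b
      apply String.toList_inj.mp
      rw [PySem.Str.toList_slice, String.toList_ofList, String.toList_ofList]
      simp [PySem.List.slice_natCast]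
    have hnospace : PySem.Str.slice (String.ofList g) (some (sep : Int)) (some ((sep : Int) + 1)) ≠ " " := by
      rw [show ((sep : Int) + 1) = ((sep + 1 : Nat) : Int) by push_cast; ring, hsl sep (sep + 1)]
      intro heq
      have h2 : (g.drop sep).take (sep + 1 - sep) = [' '] := by
        have h3 := congrArg String.toList heq
        rw [String.toList_ofList] at h3
        simpa using h3
      have hm : (' ' : Char) ∈ g :=
        List.mem_of_mem_drop (List.mem_of_mem_take (h2 ▸ List.mem_singleton.mpr rfl))
      rw [← hg] at hm
      exact absurd rfl (no_space_mem g ' ' hm)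
    rw [hpg]
    by_cases hsem : g[x]? = some (';' : Char)
    · rw [if_pos hsem, if_pos hnospace]
      rw [hsl sep x, splitSemi_at g x sep hsx hx hsem hinv]
      by_cases hlast : x + 1 = g.length
      · rw [if_pos (show (x : Int) = PySem.Str.len (String.ofList g) - 1 by rw [hlof]; omega)]
        have hempty : PySem.Str.slice (String.ofList g) (some ((x : Int) + 1)) (some ((x : Int) + 1)) = "" := by
          rw [show ((x : Int) + 1) = ((x + 1 : Nat) : Int) by push_cast; ring, hsl (x + 1) (x + 1)]
          simp
        rw [if_neg (by simp [hempty])]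
        rw [sepGo_exit m _ _ _ _ (by rw [hlof]; omega)]
        rw [show g.drop (x + 1) = [] from List.drop_eq_nil_of_le (by omega)]
        simp [splitSemi, dte]
      · rw [if_neg (show ¬((x : Int) = PySem.Str.len (String.ofList g) - 1) by rw [hlof]; omega)]
        rw [show ((x : Int) + 1) = ((x + 1 : Nat) : Int) by push_cast; ring]
        rw [ih (String.ofList g) (x + 1) (x + 1) _
          (by rw [String.toList_ofList]; exact hg) (by omega) (by omega) le_rfl
          (by intro i h1 h2; omega)]
        rw [dte_cons _ _ (splitSemi_ne_nil _)]
        simp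
    · rw [if_neg hsem]
      by_cases hlast : x + 1 = g.length
      · rw [if_pos (show (x : Int) = PySem.Str.len (String.ofList g) - 1 by rw [hlof]; omega)]
        have hslice : PySem.Str.slice (String.ofList g) (some (sep : Int)) (some ((x : Int) + 1))
            = String.ofList (g.drop sep) := by
          rw [show ((x : Int) + 1) = ((x + 1 : Nat) : Int) by push_cast; ring, hsl sep (x + 1)]
          rw [List.take_of_length_le (by simp; omega)]
        have hd : g.drop sep ≠ [] := by
          intro h; rw [List.drop_eq_nil_iff] at h; omega
        have hne : String.ofList (g.drop sep) ≠ "" := by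
          intro h
          exact hd (by simpa using congrArg String.toList h)
        rw [hslice, if_pos hne]
        rw [sepGo_exit m _ _ _ _ (by rw [hlof]; omega)]
        have hnos : (';' : Char) ∉ g.drop sep := by
          intro hm
          obtain ⟨j, hj, hget⟩ := List.mem_iff_getElem.mp hm
          rw [List.getElem_drop] at hget
          have hjl : sep + j < g.length := by simp at hj; omega
          by_cases hix : sep + j = x
          · exact hsem (by rw [← hix, List.getElem?_eq_getElem hjl]; exact congrArg some hget)
          · exact hinv (sep + j) (by omega) (by omega)
              (by rw [List.getElem?_eq_getElem hjl]; exact congrArg some hget)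
        rw [splitSemi_no _ hnos]
        simp [dte, hd]
      · rw [if_neg (show ¬((x : Int) = PySem.Str.len (String.ofList g) - 1) by rw [hlof]; omega)]
        rw [show ((x : Int) + 1) = ((x + 1 : Nat) : Int) by push_cast; ring]
        exact ih (String.ofList g) (x + 1) sep lista
          (by rw [String.toList_ofList]; exact hg) (by omega) (by omega) (by omega)
          (by intro i h1 h2
              by_cases hix : i = x
              · subst hix; exact hsem
              · exact hinv i h1 (by omega))

lemma pyGet_neg_one_getLast {α : Type} (l : List α) (h : l ≠ []) :
    PySem.List.pyGet? l (-1) = l.getLast? := by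
  have hl : 0 < l.length := List.length_pos_iff.mpr h
  rw [PySem.List.pyGet?, PySem.List.pyIdx?]
  rw [if_neg (by omega), if_pos (by exact_mod_cast by omega : -(l.length : Int) ≤ -1)]
  simp [List.getLast?_eq_getElem?]

lemma alt_eq (cadena : String) :
    separate_semicolon_alt cadena = (dte (splitSemi (pvN cadena.toList))).map String.ofList := by
  simp only [separate_semicolon_alt]
  have hs : (PySem.Str.replace (PySem.Str.replace cadena "." "_") " " "_").toList
      = pvN cadena.toList := by
    rw [PySem.Str.toList_replace, PySem.Str.toList_replace,
      show (".".toList) = ['.'] from rfl, show (" ".toList) = [' '] from rfl,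
      show ("_".toList) = ['_'] from rfl, repl_single, repl_single]
    rfl
  have hsplit : PySem.Str.split? (PySem.Str.replace (PySem.Str.replace cadena "." "_") " " "_") ";"
      = some ((splitSemi (pvN cadena.toList)).map String.ofList) := by
    have h1 := PySem.Str.split?_map (PySem.Str.replace (PySem.Str.replace cadena "." "_") " " "_") ";"
    rw [hs, show (";".toList) = [';'] from rfl] at h1
    rw [PySem.Chars.split?, if_neg (by simp), splitOn_semi] at h1
    rcases h2 : PySem.Str.split? (PySem.Str.replace (PySem.Str.replace cadena "." "_") " " "_") ";" with _ | ps
    · rw [h2] at h1; simp at h1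
    · rw [h2] at h1
      simp only [Option.map_some, Option.some_inj] at h1
      have : ps = (splitSemi (pvN cadena.toList)).map String.ofList := by
        rw [← h1]
        simp [List.map_map, Function.comp_def, String.ofList_toList]
      rw [this]
  rw [hsplit]
  simp only [Option.getD_some]
  have hr : splitSemi (pvN cadena.toList) ≠ [] := splitSemi_ne_nil _
  have hparts : (splitSemi (pvN cadena.toList)).map String.ofList ≠ [] := by simp [hr]
  rw [pyGet_neg_one_getLast _ hparts, List.getLast?_map]
  by_cases hlast : (splitSemi (pvN cadena.toList)).getLast? = some []
  · rw [if_pos ⟨hparts, by rw [hlast]; rfl⟩, dte, if_pos hlast, ← List.map_dropLast]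
  · rw [if_neg, dte, if_neg hlast]
    rintro ⟨-, habs⟩
    rcases h3 : (splitSemi (pvN cadena.toList)).getLast? with _ | y
    · rw [h3] at habs; simp at habs
    · rw [h3] at habs
      simp only [Option.map_some, Option.some_inj] at habs
      apply hlast
      rw [h3]
      have : y = [] := by
        have := congrArg String.toList habs
        simpa using this
      rw [this]

-- ===== VERDICT (by name: the statement is the Claim_ definition above) =====
theorem separate_semicolon_spec : Claim_equal_separate_semicolon := by
  intro cadena _
  show separate_semicolon cadena = separate_semicolon_alt cadena
  rw [alt_eq]
  unfold separate_semicolon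
  by_cases hn : cadena.toList.length = 0
  · have hnil : cadena.toList = [] := List.length_eq_zero_iff.mp hn
    rw [show sepGo (cadena.toList.length + 1) cadena 0 0 [] = [] by
      simp only [sepGo]
      rw [if_neg (by rw [PySem.Str.len_eq, hn]; omega)]]
    rw [hnil]
    simp [pvN, splitSemi, dte]
  · have hpos : 0 < (pvN cadena.toList).length := by rw [pvN_length]; omega
    have h := sepGo_spec (pvN cadena.toList) (pvN_idem _) (cadena.toList.length + 1) cadena 0 0 []
      rfl hpos (by rw [pvN_length]; omega) le_rfl (by intro i h1 h2; omega)
    simpa using h
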